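-- pv_equiv track=rewrite | github.com/Di-Chai/GraphCNN-Bike | NYC/dataAPI/apis.py | isGoodData_WeeklyDemand
-- ===== SOURCE A (Python) =====
-- def check_positive(dataList):
--     positiveFlag = False
--     for e in dataList:
--         if e > 0:
--             positiveFlag = True
--             break
--     return positiveFlag
--
-- def isGoodData_WeeklyDemand(valueList):
--     dataFlag = False
--     if check_positive(valueList):
--         for e in valueList:
--             if e > 5:
--                 dataFlag = True
--                 break
--         return dataFlag
--     else:
--         return dataFlag
-- ===== SOURCE B (Python) =====
-- def isGoodData_WeeklyDemand(valueList):
--     # any element > 5 is necessarily positive, so the separate positive scan is redundant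
--     return any(e > 5 for e in valueList)
-- ===== Notes on version B (the rewrite author's own statement) =====
-- stated objective: simpler
-- what changed: Drops A's separate check_positive pass and its flag, returning any(e > 5) in one scan since e > 5 implies e > 0.
import Mathlib
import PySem

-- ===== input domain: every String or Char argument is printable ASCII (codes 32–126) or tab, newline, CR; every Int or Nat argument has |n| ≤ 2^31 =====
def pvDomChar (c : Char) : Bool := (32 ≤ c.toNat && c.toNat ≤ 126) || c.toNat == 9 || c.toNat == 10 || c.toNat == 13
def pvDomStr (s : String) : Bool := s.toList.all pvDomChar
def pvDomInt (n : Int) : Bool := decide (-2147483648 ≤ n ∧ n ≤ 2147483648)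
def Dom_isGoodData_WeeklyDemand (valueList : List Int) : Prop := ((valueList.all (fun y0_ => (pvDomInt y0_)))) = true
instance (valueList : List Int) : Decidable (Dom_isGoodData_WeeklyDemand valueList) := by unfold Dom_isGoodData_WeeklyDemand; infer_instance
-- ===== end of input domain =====

-- B drops A's separate check_positive pass: any(e > 5) suffices since e > 5 implies e > 0.

-- ===== PORT A =====
-- helper check_positive: loop with break over dataList
def check_positive (dataList : List Int) : Bool :=
  match dataList with
  | [] => false
  | e :: rest => if e > 0 then true else check_positive rest

-- inner loop of isGoodData_WeeklyDemand: scan for e > 5 with break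
def isGoodData_WeeklyDemand_loop (valueList : List Int) : Bool :=
  match valueList with
  | [] => false
  | e :: rest => if e > 5 then true else isGoodData_WeeklyDemand_loop rest

def isGoodData_WeeklyDemand (valueList : List Int) : Bool :=
  if check_positive valueList then isGoodData_WeeklyDemand_loop valueList
  else false

-- ===== PORT B =====
def isGoodData_WeeklyDemand_alt (valueList : List Int) : Bool :=
  valueList.any (fun e => e > 5)

-- ===== PRECONDITION & SPEC =====
def Spec_isGoodData_WeeklyDemand (valueList : List Int) (out : Bool) : Prop := out = isGoodData_WeeklyDemand_alt valueList
instance (valueList : List Int) (out : Bool) : Decidable (Spec_isGoodData_WeeklyDemand valueList out) := by unfold Spec_isGoodData_WeeklyDemand; infer_instance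

-- ===== CLAIM (what is proved, stated in full; the proofs are below) =====
def Claim_equal_isGoodData_WeeklyDemand : Prop := ∀ (valueList : List Int), Dom_isGoodData_WeeklyDemand valueList → Spec_isGoodData_WeeklyDemand valueList (isGoodData_WeeklyDemand valueList)

-- ===== LEMMAS AND PROOFS =====

lemma loop_eq_any (valueList : List Int) :
    isGoodData_WeeklyDemand_loop valueList = valueList.any (fun e => e > 5) := by
  induction valueList with
  | nil => rfl
  | cons e rest ih =>
    simp only [isGoodData_WeeklyDemand_loop, List.any_cons, ih]
    by_cases h : e > 5 <;> simp [h]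

lemma pos_of_any_gt5 (valueList : List Int) :
    valueList.any (fun e => e > 5) = true → check_positive valueList = true := by
  induction valueList with
  | nil => simp
  | cons e rest ih =>
    simp only [List.any_cons, check_positive]
    intro h
    by_cases he : e > 0
    · simp [he]
    · simp only [he, if_false]
      apply ih
      rcases Bool.or_eq_true_iff.mp h with h5 | hr
      · exfalso; have := of_decide_eq_true h5; omega
      · exact hr

-- ===== VERDICT (by name: the statement is the Claim_ definition above) =====
theorem isGoodData_WeeklyDemand_spec : Claim_equal_isGoodData_WeeklyDemand := by
  intro valueList _
  unfold Spec_isGoodData_WeeklyDemand isGoodData_WeeklyDemand isGoodData_WeeklyDemand_alt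
  by_cases hp : check_positive valueList = true
  · simp [hp, loop_eq_any]
  · simp only [hp, if_false, Bool.false_eq]
    cases hA : valueList.any (fun e => e > 5) with
    | false => rfl
    | true => exact absurd (pos_of_any_gt5 _ hA) hp
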